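-- pv_equiv track=rewrite | github.com/heroleggo/codetree-TILs | 240924/2개 이상의 알파벳/more-than-one-alphabet.py | check
-- ===== SOURCE A (Python) =====
-- def check(string):
--     for idx in range(len(string)):
--         if idx == 0:
--             continue
--         else:
--             if string[idx] != string[idx - 1]:
--                 return "Yes"
--     return "No"
-- ===== SOURCE B (Python) =====
-- def check(string):
--     return "Yes" if len(set(string)) > 1 else "No"
-- ===== Notes on version B (the rewrite author's own statement) =====
-- stated objective: simpler
-- what changed: Replaces the index loop comparing adjacent characters (with an idx==0 guard and early return) by building the set of distinct characters once and comparing its cardinality to 1.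
import Mathlib
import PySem

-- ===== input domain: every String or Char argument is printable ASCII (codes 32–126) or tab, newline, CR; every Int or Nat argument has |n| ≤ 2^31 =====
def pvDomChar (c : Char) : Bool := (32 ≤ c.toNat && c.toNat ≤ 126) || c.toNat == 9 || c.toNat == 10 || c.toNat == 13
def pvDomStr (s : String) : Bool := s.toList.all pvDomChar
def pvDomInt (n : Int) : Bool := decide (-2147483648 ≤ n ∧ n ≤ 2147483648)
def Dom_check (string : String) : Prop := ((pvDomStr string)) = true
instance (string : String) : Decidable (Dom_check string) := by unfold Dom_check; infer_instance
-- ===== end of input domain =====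

-- B replaces A's adjacent-pair index loop by a distinct-character set cardinality test (objective: simpler).

-- ===== PORT A =====
-- loop over idx in range(len(string)); both accesses are in range, so getElem is exact here
def checkGo (cs : List Char) (idx : Nat) : String :=
  if h : idx < cs.length then
    if idx = 0 then checkGo cs (idx + 1)
    else if cs[idx] ≠ cs[idx - 1]'(by omega) then "Yes"
    else checkGo cs (idx + 1)
  else "No"
termination_by cs.length - idx

def check (string : String) : String := checkGo string.toList 0

-- ===== PORT B =====
def check_alt (string : String) : String :=
  if PySem.Set.len (PySem.Set.ofList string.toList) > 1 then "Yes" else "No"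

-- ===== PRECONDITION & SPEC =====
def Spec_check (string : String) (out : String) : Prop := out = check_alt string
instance (string : String) (out : String) : Decidable (Spec_check string out) := by unfold Spec_check; infer_instance

-- ===== CLAIM (what is proved, stated in full; the proofs are below) =====
def Claim_equal_check : Prop := ∀ (string : String), Dom_check string → Spec_check string (check string)

-- ===== LEMMAS AND PROOFS =====

-- A's loop from index j+1 answers "No" when every adjacent pair from position j on is equal
theorem checkGo_no (cs : List Char) :
    ∀ n j, cs.length - (j + 1) ≤ n →
      (∀ i, j ≤ i → ∀ (h : i + 1 < cs.length), cs[i + 1] = cs[i]) →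
      checkGo cs (j + 1) = "No" := by
  intro n
  induction n with
  | zero =>
    intro j hn _
    rw [checkGo]
    rw [dif_neg (by omega)]
  | succ n ih =>
    intro j hn hC
    rw [checkGo]
    by_cases hlt : j + 1 < cs.length
    · rw [dif_pos hlt, if_neg (by omega)]
      have hpair : cs[j + 1] = cs[j + 1 - 1]'(by omega) := by
        simpa using hC j (le_refl j) hlt
      rw [if_neg (by simpa using hpair)]
      exact ih (j + 1) (by omega) (fun i hi h => hC i (by omega) h)
    · rw [dif_neg hlt]

-- and answers "Yes" when some adjacent pair from position j on differs
theorem checkGo_yes (cs : List Char) :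
    ∀ n j, cs.length - (j + 1) ≤ n →
      ¬ (∀ i, j ≤ i → ∀ (h : i + 1 < cs.length), cs[i + 1] = cs[i]) →
      checkGo cs (j + 1) = "Yes" := by
  intro n
  induction n with
  | zero =>
    intro j hn hC
    exact absurd (fun i hi h => absurd h (by omega)) hC
  | succ n ih =>
    intro j hn hC
    by_cases hlt : j + 1 < cs.length
    · rw [checkGo, dif_pos hlt, if_neg (by omega)]
      by_cases hpair : cs[j + 1] = cs[j + 1 - 1]'(by omega)
      · rw [if_neg (by simpa using hpair)]
        apply ih (j + 1) (by omega)
        intro hC'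
        apply hC
        intro i hi h
        rcases Nat.eq_or_lt_of_le hi with heq | hlt'
        · subst heq; simpa using hpair
        · exact hC' i (by omega) h
      · rw [if_pos (by simpa using hpair)]
    · exact absurd (fun i hi h => absurd h (by omega)) hC

-- all adjacent pairs equal iff every element equals the head
theorem allAdj_iff (a : Char) (l : List Char) :
    (∀ i, ∀ (h : i + 1 < (a :: l).length), (a :: l)[i + 1] = (a :: l)[i]) ↔ ∀ x ∈ l, x = a := by
  induction l generalizing a with
  | nil => simp
  | cons b l ih =>
    constructor
    · intro h x hx
      have hab : b = a := h 0 (by simp)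
      rcases List.mem_cons.mp hx with rfl | hx
      · exact hab
      · refine ((ih b).mp (fun i hi => ?_) x hx).trans hab
        have hstep := h (i + 1) (by simp only [List.length_cons] at hi ⊢; omega)
        simpa using hstep
    · intro h i hi
      have hb : b = a := h b (by simp)
      have hrest : ∀ x ∈ l, x = b := fun x hx => (h x (by simp [hx])).trans hb.symm
      cases i with
      | zero => simpa using hb
      | succ i =>
        have hstep := (ih b).mpr hrest i (by simp only [List.length_cons] at hi ⊢; omega)
        simpa using hstep

-- if every element of l equals a, the distinct-set of a::l stays [a]
theorem foldl_add_all_eq (a : Char) (l : List Char) (h : ∀ x ∈ l, x = a) :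
    List.foldl PySem.Set.add [a] l = [a] := by
  induction l with
  | nil => rfl
  | cons b l ih =>
    have hb : b = a := h b (by simp)
    subst hb
    have hadd : PySem.Set.add [b] b = [b] := by
      simp [PySem.Set.add, PySem.Set.contains]
    rw [List.foldl_cons, hadd]
    exact ih (fun x hx => h x (by simp [hx]))

theorem mem_len_le_one {l : List Char} (h : l.length ≤ 1) {a x : Char}
    (ha : a ∈ l) (hx : x ∈ l) : x = a := by
  match l with
  | [] => simp at ha
  | [c] => simp at ha hx; rw [ha, hx]
  | c :: d :: t => simp at h

theorem all_eq_of_length_le_one (a : Char) (l : List Char)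
    (h : (PySem.Set.ofList (a :: l)).length ≤ 1) : ∀ x ∈ l, x = a := by
  have ha : a ∈ PySem.Set.ofList (a :: l) := (PySem.Set.mem_ofList _ _).mpr (by simp)
  intro x hx
  exact mem_len_le_one h ha ((PySem.Set.mem_ofList _ _).mpr (by simp [hx]))

-- ===== VERDICT (by name: the statement is the Claim_ definition above) =====
theorem check_spec : Claim_equal_check := by
  intro s _
  unfold Spec_check check check_alt
  match hcs : s.toList with
  | [] =>
    rw [checkGo, dif_neg (by simp)]
    rw [if_neg (by simp [PySem.Set.len, PySem.Set.ofList])]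
  | a :: l =>
    rw [checkGo, dif_pos (by simp), if_pos rfl]
    by_cases hall : ∀ x ∈ l, x = a
    · rw [checkGo_no (a :: l) ((a :: l).length) 0 (by omega)
        (fun i _ h => (allAdj_iff a l).mpr hall i h)]
      have hof : PySem.Set.ofList (a :: l) = [a] := by
        show List.foldl PySem.Set.add (PySem.Set.add [] a) l = [a]
        rw [show PySem.Set.add ([] : List Char) a = [a] from rfl]
        exact foldl_add_all_eq a l hall
      rw [if_neg]
      rw [hof]
      simp [PySem.Set.len]
    · rw [checkGo_yes (a :: l) ((a :: l).length) 0 (by omega)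
        (fun hC => hall ((allAdj_iff a l).mp (fun i h => hC i (by omega) h)))]
      rw [if_pos]
      by_contra hle
      apply hall
      apply all_eq_of_length_le_one
      simp only [PySem.Set.len, not_lt] at hle
      omega
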